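-- pv_equiv track=rewrite | github.com/fatemehkeshtkar/- | session1.py | compute
-- ===== SOURCE A (Python) =====
-- def compute(n):
--     a = 5
--     l = 0
--     t = 0
--
--     for i in range(n):
--         p = t
--         t = l + 6
--         l += 2
--
--     return a, l, t
-- ===== SOURCE B (Python) =====
-- def compute(n):
--     # closed form: loop adds 2 per iteration starting from l=0; t lags one step behind
--     if n <= 0:
--         return 5, 0, 0
--     return 5, 2 * n, 2 * n + 4
-- ===== Notes on version B (the rewrite author's own statement) =====
-- stated objective: faster
-- what changed: Replaced the O(n) loop accumulating l and t with the closed-form answer (5, 2n, 2n+4), with (5, 0, 0) when n <= 0.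
import Mathlib
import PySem

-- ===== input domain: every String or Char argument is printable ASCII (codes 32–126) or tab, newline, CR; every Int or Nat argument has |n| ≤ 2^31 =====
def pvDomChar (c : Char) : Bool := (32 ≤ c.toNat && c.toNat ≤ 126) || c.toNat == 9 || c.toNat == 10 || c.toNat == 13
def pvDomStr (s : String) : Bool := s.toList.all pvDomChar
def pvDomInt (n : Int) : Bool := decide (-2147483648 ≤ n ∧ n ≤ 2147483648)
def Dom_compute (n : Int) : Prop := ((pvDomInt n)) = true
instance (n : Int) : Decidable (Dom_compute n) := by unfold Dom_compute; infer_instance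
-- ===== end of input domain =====

-- B replaces A's O(n) loop by the closed form (5, 2n, 2n+4) (and (5,0,0) for n ≤ 0).

-- ===== PORT A =====
-- loop state (l, t); per iteration: t = l + 6, l = l + 2 (p is dead)
def compute (n : Int) : List Int :=
  let a : Int := 5
  let lt := (PySem.List.pyRange 0 n 1).foldl
    (fun (s : Int × Int) (_ : Int) => (s.1 + 2, s.1 + 6)) (0, 0)
  [a, lt.1, lt.2]

-- ===== PORT B =====
def compute_alt (n : Int) : List Int :=
  if n ≤ 0 then [5, 0, 0] else [5, 2 * n, 2 * n + 4]

-- ===== PRECONDITION & SPEC =====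
def Spec_compute (n : Int) (out : List Int) : Prop := out = compute_alt n
instance (n : Int) (out : List Int) : Decidable (Spec_compute n out) := by unfold Spec_compute; infer_instance

-- ===== CLAIM (what is proved, stated in full; the proofs are below) =====
def Claim_equal_compute : Prop := ∀ (n : Int), Dom_compute n → Spec_compute n (compute n)

-- ===== LEMMAS AND PROOFS =====

theorem compute_foldl_closed (xs : List Int) (l0 t0 : Int) (h : xs ≠ []) :
    xs.foldl (fun (s : Int × Int) (_ : Int) => (s.1 + 2, s.1 + 6)) (l0, t0)
      = (l0 + 2 * xs.length, l0 + 2 * xs.length + 4) := by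
  induction xs generalizing l0 t0 with
  | nil => exact absurd rfl h
  | cons x xs ih =>
    simp only [List.foldl_cons]
    cases xs with
    | nil => simp; ring_nf
    | cons y ys =>
      rw [ih _ _ (by simp)]
      simp only [List.length_cons, Prod.mk.injEq]
      push_cast
      constructor <;> ring

-- ===== VERDICT (by name: the statement is the Claim_ definition above) =====
theorem compute_spec : Claim_equal_compute := by
  intro n _
  unfold Spec_compute compute compute_alt
  by_cases hn : n ≤ 0
  · rw [PySem.List.pyRange_one_eq_nil (by omega)]
    simp [hn]
  · have hne : PySem.List.pyRange 0 n 1 ≠ [] := by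
      rw [PySem.List.pyRange_one_cons (by omega)]; simp
    rw [compute_foldl_closed _ _ _ hne]
    rw [PySem.List.length_pyRange_one]
    simp [hn]
    omega
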